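-- pv_equiv track=rewrite | github.com/genghisshyy/INFO_2950_FinalProject | data_collection.py | organize_basic_album_info
-- ===== SOURCE A (Python) =====
-- def organize_basic_album_info(album_info):
--     albums = []
--
--     # for each set of 5 rows in album_info, maps row number to field name
--     field_mapping = {0: "title", 1: "metascore", 2: "artist", 3: "user_score", 4: "release_date"}
--
--     for i in range(len(album_info)):
--         current_info = album_info[i]
--         field_index = i % 5 # used to tell what kind of information is stored in album_info[i]
--         album_index = i // 5 # tells us at which index in albums we should store current_info in
--         if field_index == 0:
--             albums.append(dict())
--         # cleans data to obtain user score
--         if field_mapping[field_index] == "user_score":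
--             current_info = current_info[6:]
--         albums[album_index][field_mapping[field_index]] = current_info
--     return albums
-- ===== SOURCE B (Python) =====
-- FIELD_NAMES = ["title", "metascore", "artist", "user_score", "release_date"]
--
-- def organize_basic_album_info(album_info):
--     albums = []
--     i = 0
--     while i < len(album_info):
--         chunk = album_info[i:i+5]
--         albums.append({name: (val[6:] if name == "user_score" else val)
--                        for name, val in zip(FIELD_NAMES, chunk)})
--         i += 5
--     return albums
-- ===== Notes on version B (the rewrite author's own statement) =====
-- stated objective: simpler
-- what changed: Replaces A's flat per-element loop with i%5/i//5 arithmetic, conditional dict-append and mutation of the dict at albums[i//5] by a while loop that takes one 5-element chunk per iteration and builds each album dict in one go by zipping the chunk against the field-name list.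
import Mathlib
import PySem

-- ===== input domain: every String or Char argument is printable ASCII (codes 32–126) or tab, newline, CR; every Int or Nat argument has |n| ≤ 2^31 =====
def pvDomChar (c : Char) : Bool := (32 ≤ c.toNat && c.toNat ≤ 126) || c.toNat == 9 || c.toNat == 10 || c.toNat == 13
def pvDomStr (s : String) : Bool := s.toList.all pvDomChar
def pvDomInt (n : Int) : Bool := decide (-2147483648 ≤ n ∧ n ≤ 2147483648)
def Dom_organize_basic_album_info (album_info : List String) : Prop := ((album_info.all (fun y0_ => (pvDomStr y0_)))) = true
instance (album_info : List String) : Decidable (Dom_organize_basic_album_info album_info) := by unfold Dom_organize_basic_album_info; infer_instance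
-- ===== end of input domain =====

-- B replaces A's flat index loop (`i % 5` / `i // 5` arithmetic writing into a growing dict list)
-- by peeling one 5-element chunk per iteration and building each album dict in one go; objective: simpler.

-- ===== PORT A =====
def pvFieldMapping : PySem.Dict Int String :=
  PySem.Dict.ofList [(0, "title"), (1, "metascore"), (2, "artist"), (3, "user_score"), (4, "release_date")]

-- one body of A's `for i in range(len(album_info))` loop (i is always in range and nonnegative,
-- so pyGetD/ toNat are exact here)
def pvAStep (album_info : List String) (albums : List (PySem.Dict String String)) (i : Int) :
    List (PySem.Dict String String) :=
  let current_info := PySem.List.pyGetD album_info i ""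
  let field_index := PySem.Int.mod i 5
  let album_index := PySem.Int.floordiv i 5
  let albums := if field_index = 0 then albums ++ [PySem.Dict.mk []] else albums
  let key := (pvFieldMapping.get? field_index).getD ""
  let current_info := if key = "user_score" then PySem.Str.slice current_info (some 6) none else current_info
  albums.modify album_index.toNat (fun d => d.insert key current_info)

def organize_basic_album_info (album_info : List String) : List (List (String × String)) :=
  ((PySem.List.pyRange 0 (album_info.length : Int) 1).foldl (pvAStep album_info) []).map
    (fun d => d.items)

-- ===== PORT B =====
def pvFieldNames : List String := ["title", "metascore", "artist", "user_score", "release_date"]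

def pvBuildAlbum (chunk : List String) : List (String × String) :=
  (pvFieldNames.zip chunk).map
    (fun p => (p.1, if p.1 = "user_score" then PySem.Str.slice p.2 (some 6) none else p.2))

-- B's `while i < len(album_info):` loop: one 5-element chunk per iteration, advancing i by 5
def pvChunkLoop (album_info : List String) (albums : List (List (String × String)))
    (i : Nat) : List (List (String × String)) :=
  if i < album_info.length then
    pvChunkLoop album_info
      (albums ++ [pvBuildAlbum (PySem.List.slice album_info (some (i : Int)) (some ((i : Int) + 5)))])
      (i + 5)
  else albums
termination_by album_info.length - i
decreasing_by omega

def organize_basic_album_info_alt (album_info : List String) : List (List (String × String)) :=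
  pvChunkLoop album_info [] 0

-- ===== PRECONDITION & SPEC =====
def Spec_organize_basic_album_info (album_info : List String) (out : List (List (String × String))) : Prop := out = organize_basic_album_info_alt album_info
instance (album_info : List String) (out : List (List (String × String))) : Decidable (Spec_organize_basic_album_info album_info out) := by unfold Spec_organize_basic_album_info; infer_instance

-- ===== CLAIM (what is proved, stated in full; the proofs are below) =====
def Claim_equal_organize_basic_album_info : Prop := ∀ (album_info : List String), Dom_organize_basic_album_info album_info → Spec_organize_basic_album_info album_info (organize_basic_album_info album_info)


-- ===== LEMMAS AND PROOFS =====

-- proof-side helper: the chunk decomposition as a take/drop recursion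
def pvChunksOf (rest : List String) : List (List (String × String)) :=
  match rest with
  | [] => []
  | x :: xs => pvBuildAlbum ((x :: xs).take 5) :: pvChunksOf ((x :: xs).drop 5)
termination_by rest.length
decreasing_by simp

theorem pv_modify_last {α : Type} (l : List α) (a : α) (f : α → α) :
    (l ++ [a]).modify l.length f = l ++ [f a] := by
  induction l with
  | nil => rfl
  | cons x xs ih => simpa [List.modify] using ih

theorem pv_getD_append (pre xs : List String) (i : Int) (r : Nat)
    (hik : i = ((pre.length + r : Nat) : Int)) (hr : r < xs.length) :
    PySem.List.pyGetD (pre ++ xs) i "" = xs.getD r "" := by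
  rw [hik, PySem.List.pyGetD_natCast, List.getD, List.getD,
    List.getElem?_append_right (by omega)]
  have h2 : pre.length + r - pre.length = r := by omega
  rw [h2]

theorem pv_key0 : ((pvFieldMapping.get? (0 : Int)).getD "") = "title" := by decide
theorem pv_key1 : ((pvFieldMapping.get? (1 : Int)).getD "") = "metascore" := by decide
theorem pv_key2 : ((pvFieldMapping.get? (2 : Int)).getD "") = "artist" := by decide
theorem pv_key3 : ((pvFieldMapping.get? (3 : Int)).getD "") = "user_score" := by decide
theorem pv_key4 : ((pvFieldMapping.get? (4 : Int)).getD "") = "release_date" := by decide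

theorem pvAStep_eval (full : List String) (albums : List (PySem.Dict String String)) (i : Int)
    (k r : Nat) (hik : i = 5 * (k : Int) + (r : Int)) (hr : r < 5) :
    pvAStep full albums i =
      (if r = 0 then albums ++ [PySem.Dict.mk []] else albums).modify k
        (fun d => d.insert ((pvFieldMapping.get? (r : Int)).getD "")
          (if r = 3 then PySem.Str.slice (PySem.List.pyGetD full i "") (some 6) none
           else PySem.List.pyGetD full i "")) := by
  unfold pvAStep
  have hm : PySem.Int.mod i 5 = (r : Int) := by
    rw [PySem.Int.mod_eq_emod_of_pos (by norm_num)]; omega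
  have hd : PySem.Int.floordiv i 5 = (k : Int) := by
    rw [PySem.Int.floordiv_eq_ediv_of_pos (by norm_num)]; omega
  simp only [hm, hd, Int.toNat_natCast]
  interval_cases r <;> simp [pv_key0, pv_key1, pv_key2, pv_key3, pv_key4]

theorem pv_insert_snoc (l : List (String × String)) (k : String) (v : String)
    (h : (PySem.Dict.mk l).contains k = false) :
    (PySem.Dict.mk l).insert k v = PySem.Dict.mk (l ++ [(k, v)]) := by
  apply PySem.Dict.ext
  rw [PySem.Dict.items_insert_of_not_contains _ _ h]

theorem pv_step0 (full pre ys : List String) (hfull : full = pre ++ ys)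
    (albums : List (PySem.Dict String String)) (hpre : pre.length = 5 * albums.length)
    (hy : ys ≠ []) :
    pvAStep full albums (pre.length : Int) =
      albums ++ [PySem.Dict.mk [("title", ys.getD 0 "")]] := by
  rw [pvAStep_eval full albums _ albums.length 0 (by push_cast; omega) (by norm_num)]
  rw [hfull, pv_getD_append pre ys _ 0 (by push_cast; ring) (by cases ys <;> simp_all)]
  simp [pv_modify_last, pv_key0]
  rfl

theorem pv_step (full pre ys : List String) (hfull : full = pre ++ ys)
    (albums : List (PySem.Dict String String)) (its : List (String × String))
    (hpre : pre.length = 5 * albums.length) (r : Nat) (i : Int)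
    (hik : i = (pre.length : Int) + (r : Int)) (h1 : 1 ≤ r) (hr : r < 5)
    (hrl : r < ys.length) :
    pvAStep full (albums ++ [PySem.Dict.mk its]) i =
      albums ++ [(PySem.Dict.mk its).insert ((pvFieldMapping.get? (r : Int)).getD "")
        (if r = 3 then PySem.Str.slice (ys.getD r "") (some 6) none else ys.getD r "")] := by
  rw [pvAStep_eval full _ _ albums.length r (by push_cast; omega) hr]
  rw [hfull, pv_getD_append pre ys _ r (by push_cast [hik]; ring) hrl]
  rw [if_neg (by omega), pv_modify_last]

theorem pv_range2 (L : Int) : PySem.List.pyRange L (L + 2) 1 = [L, L + 1] := by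
  rw [PySem.List.pyRange_one]; norm_num
  rw [show Int.toNat 2 = 2 from rfl]; simp [List.range_succ]
theorem pv_range3 (L : Int) : PySem.List.pyRange L (L + 3) 1 = [L, L + 1, L + 2] := by
  rw [PySem.List.pyRange_one]; norm_num
  rw [show Int.toNat 3 = 3 from rfl]; simp [List.range_succ]
theorem pv_range4 (L : Int) : PySem.List.pyRange L (L + 4) 1 = [L, L + 1, L + 2, L + 3] := by
  rw [PySem.List.pyRange_one]; norm_num
  rw [show Int.toNat 4 = 4 from rfl]; simp [List.range_succ]
theorem pv_range5 (L : Int) : PySem.List.pyRange L (L + 5) 1 = [L, L+1, L+2, L+3, L+4] := by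
  rw [PySem.List.pyRange_one]; norm_num
  rw [show Int.toNat 5 = 5 from rfl]; simp [List.range_succ]

-- processing the first chunk.length loop indices of a chunk (1 ≤ length ≤ 5) appends exactly
-- the album dict B builds from that chunk
theorem pv_chunk (chunk tail pre : List String) (albums : List (PySem.Dict String String))
    (hpre : pre.length = 5 * albums.length) (hlen : chunk.length ≤ 5) (hne : chunk ≠ []) :
    List.foldl (pvAStep (pre ++ (chunk ++ tail))) albums
        (PySem.List.pyRange (pre.length : Int) ((pre.length : Int) + (chunk.length : Int)) 1)
      = albums ++ [PySem.Dict.mk (pvBuildAlbum chunk)] := by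
  rcases chunk with _ | ⟨a, _ | ⟨b, _ | ⟨c, _ | ⟨d, _ | ⟨e, rest⟩⟩⟩⟩⟩
  · exact absurd rfl hne
  · norm_num
    rw [pv_step0 _ pre (a :: tail) rfl albums hpre (by simp)]
    simp [pvBuildAlbum, pvFieldNames]
  · norm_num
    rw [pv_range2, List.foldl_cons, List.foldl_cons, List.foldl_nil,
      pv_step0 _ pre (a :: b :: tail) rfl albums hpre (by simp),
      pv_step _ pre (a :: b :: tail) rfl albums _ hpre 1 ((pre.length : Int) + 1)
        (by push_cast; ring) (by norm_num) (by norm_num) (by simp),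
      pv_insert_snoc _ _ _ rfl]
    simp [pvBuildAlbum, pvFieldNames, pv_key1]
  · norm_num
    rw [pv_range3, List.foldl_cons, List.foldl_cons, List.foldl_cons, List.foldl_nil,
      pv_step0 _ pre (a :: b :: c :: tail) rfl albums hpre (by simp),
      pv_step _ pre (a :: b :: c :: tail) rfl albums _ hpre 1 ((pre.length : Int) + 1)
        (by push_cast; ring) (by norm_num) (by norm_num) (by simp),
      pv_insert_snoc _ _ _ rfl,
      pv_step _ pre (a :: b :: c :: tail) rfl albums _ hpre 2 ((pre.length : Int) + 2)
        (by push_cast; ring) (by norm_num) (by norm_num) (by simp),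
      pv_insert_snoc _ _ _ rfl]
    simp [pvBuildAlbum, pvFieldNames, pv_key1, pv_key2]
  · norm_num
    rw [pv_range4, List.foldl_cons, List.foldl_cons, List.foldl_cons, List.foldl_cons, List.foldl_nil,
      pv_step0 _ pre (a :: b :: c :: d :: tail) rfl albums hpre (by simp),
      pv_step _ pre (a :: b :: c :: d :: tail) rfl albums _ hpre 1 ((pre.length : Int) + 1)
        (by push_cast; ring) (by norm_num) (by norm_num) (by simp),
      pv_insert_snoc _ _ _ rfl,
      pv_step _ pre (a :: b :: c :: d :: tail) rfl albums _ hpre 2 ((pre.length : Int) + 2)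
        (by push_cast; ring) (by norm_num) (by norm_num) (by simp),
      pv_insert_snoc _ _ _ rfl,
      pv_step _ pre (a :: b :: c :: d :: tail) rfl albums _ hpre 3 ((pre.length : Int) + 3)
        (by push_cast; ring) (by norm_num) (by norm_num) (by simp),
      pv_insert_snoc _ _ _ rfl]
    simp [pvBuildAlbum, pvFieldNames, pv_key1, pv_key2, pv_key3]
  · have h0 : rest.length = 0 := by simp at hlen; omega
    have hrest : rest = [] := List.eq_nil_of_length_eq_zero h0
    subst hrest
    norm_num
    rw [pv_range5, List.foldl_cons, List.foldl_cons, List.foldl_cons, List.foldl_cons, List.foldl_cons, List.foldl_nil,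
      pv_step0 _ pre (a :: b :: c :: d :: e :: tail) rfl albums hpre (by simp),
      pv_step _ pre (a :: b :: c :: d :: e :: tail) rfl albums _ hpre 1 ((pre.length : Int) + 1)
        (by push_cast; ring) (by norm_num) (by norm_num) (by simp),
      pv_insert_snoc _ _ _ rfl,
      pv_step _ pre (a :: b :: c :: d :: e :: tail) rfl albums _ hpre 2 ((pre.length : Int) + 2)
        (by push_cast; ring) (by norm_num) (by norm_num) (by simp),
      pv_insert_snoc _ _ _ rfl,
      pv_step _ pre (a :: b :: c :: d :: e :: tail) rfl albums _ hpre 3 ((pre.length : Int) + 3)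
        (by push_cast; ring) (by norm_num) (by norm_num) (by simp),
      pv_insert_snoc _ _ _ rfl,
      pv_step _ pre (a :: b :: c :: d :: e :: tail) rfl albums _ hpre 4 ((pre.length : Int) + 4)
        (by push_cast; ring) (by norm_num) (by norm_num) (by simp),
      pv_insert_snoc _ _ _ rfl]
    simp [pvBuildAlbum, pvFieldNames, pv_key1, pv_key2, pv_key3, pv_key4]

theorem pvChunksOf_cons (x : String) (xs : List String) :
    pvChunksOf (x :: xs) =
      pvBuildAlbum ((x :: xs).take 5) :: pvChunksOf ((x :: xs).drop 5) := by
  rw [pvChunksOf]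

theorem pvChunkLoop_eq (n : Nat) : ∀ (full : List String) (i : Nat)
    (acc : List (List (String × String))), full.length - i ≤ n →
    pvChunkLoop full acc i = acc ++ pvChunksOf (full.drop i) := by
  induction n with
  | zero =>
    intro full i acc h
    rw [pvChunkLoop, if_neg (by omega)]
    have hdrop : full.drop i = [] := List.drop_eq_nil_of_le (by omega)
    simp [hdrop, pvChunksOf]
  | succ n ih =>
    intro full i acc h
    by_cases hi : i < full.length
    · rw [pvChunkLoop, if_pos hi, ih full (i + 5) _ (by omega)]
      have hs : PySem.List.slice full (some (i : Int)) (some ((i : Int) + 5)) =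
          (full.drop i).take 5 := by
        rw [show ((i : Int) + 5) = ((i : Int) + ((5 : Nat) : Int)) by norm_num,
          PySem.List.slice_natCast_add]
      have hd : (full.drop i).drop 5 = full.drop (i + 5) := by
        rw [List.drop_drop]
      cases hcons : full.drop i with
      | nil =>
        exfalso
        have := congrArg List.length hcons
        rw [List.length_drop] at this
        simp at this
        omega
      | cons y ys =>
        rw [hs, ← hd, hcons, pvChunksOf_cons]
        simp
    · rw [pvChunkLoop, if_neg hi]
      have hdrop : full.drop i = [] := List.drop_eq_nil_of_le (by omega)
      simp [hdrop, pvChunksOf]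

theorem pv_main (n : Nat) : ∀ (xs pre : List String) (albums : List (PySem.Dict String String)),
    xs.length ≤ n → pre.length = 5 * albums.length →
    (PySem.List.pyRange (pre.length : Int) ((pre.length + xs.length : Nat) : Int) 1).foldl
        (pvAStep (pre ++ xs)) albums
      = albums ++ (pvChunksOf xs).map PySem.Dict.mk := by
  induction n with
  | zero =>
    intro xs pre albums hn hpre
    cases xs with
    | nil => simp [pvChunksOf, PySem.List.pyRange_one_eq_nil (le_refl _)]
    | cons x xs' => simp at hn
  | succ n ih =>
    intro xs pre albums hn hpre
    cases xs with
    | nil => simp [pvChunksOf, PySem.List.pyRange_one_eq_nil (le_refl _)]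
    | cons x xs' =>
      have hsplit : ((pre.length + (x :: xs').length : Nat) : Int) =
          (pre.length : Int) + ((x :: xs').length : Int) := by push_cast; ring
      by_cases hle : (x :: xs').length ≤ 5
      · have ht : (x :: xs').drop 5 = [] := List.drop_eq_nil_of_le hle
        have hchunk : (x :: xs').take 5 = x :: xs' := List.take_of_length_le hle
        rw [hsplit, show pre ++ (x :: xs') = pre ++ ((x :: xs') ++ []) by simp,
          pv_chunk (x :: xs') [] pre albums hpre hle (by simp),
          pvChunksOf_cons, hchunk, ht]
        simp [pvChunksOf]
      · push_neg at hle
        have hct : x :: xs' = (x :: xs').take 5 ++ (x :: xs').drop 5 :=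
          (List.take_append_drop 5 (x :: xs')).symm
        have hc5 : ((x :: xs').take 5).length = 5 := by rw [List.length_take]; omega
        rw [hsplit,
          PySem.List.pyRange_one_append (pre.length : Int) ((pre.length : Int) + 5) _
            (by omega) (by push_cast; omega),
          List.foldl_append]
        rw [show ((pre.length : Int) + 5) =
          ((pre.length : Int) + (((x :: xs').take 5).length : Int)) by rw [hc5]; norm_num]
        rw [show pre ++ (x :: xs') = pre ++ ((x :: xs').take 5 ++ (x :: xs').drop 5) by
          rw [← hct]]
        rw [pv_chunk _ _ pre albums hpre (by rw [hc5]) (by simp)]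
        have hstep := ih ((x :: xs').drop 5) (pre ++ (x :: xs').take 5)
          (albums ++ [PySem.Dict.mk (pvBuildAlbum ((x :: xs').take 5))])
          (by rw [List.length_drop]; omega)
          (by simp only [List.length_append, List.length_take, List.length_cons,
                List.length_nil] at hle ⊢; omega)
        rw [List.append_assoc] at hstep
        rw [show ((pre.length : Int) + (((x :: xs').take 5).length : Int)) =
            (((pre ++ (x :: xs').take 5).length : Nat) : Int) by push_cast [List.length_append]; ring]
        rw [show ((pre.length : Int) + (((x :: xs').length : Nat) : Int)) =
            (((pre ++ (x :: xs').take 5).length + ((x :: xs').drop 5).length : Nat) : Int) by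
          push_cast [List.length_append, List.length_take, List.length_drop]; omega]
        rw [hstep, pvChunksOf_cons]
        simp

-- ===== VERDICT (by name: the statement is the Claim_ definition above) =====
theorem organize_basic_album_info_spec : Claim_equal_organize_basic_album_info := by
  intro album_info _
  unfold Spec_organize_basic_album_info organize_basic_album_info organize_basic_album_info_alt
  have h := pv_main album_info.length album_info [] [] (le_refl _) (by simp)
  simp at h
  rw [h]
  rw [pvChunkLoop_eq album_info.length album_info 0 [] (by omega)]
  simp only [List.map_map, List.drop_zero, List.nil_append]
  have : ((fun (d : PySem.Dict String String) => d.items) ∘ PySem.Dict.mk) = id := rfl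
  rw [this, List.map_id]
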